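-- pv_equiv track=rewrite | github.com/kunalreddy126624/CloudSizer | app/noodle/pipeline_service.py | _repeat_to_size
-- ===== SOURCE A (Python) =====
-- def _repeat_to_size(seed: str, target_bytes: int) -> str:
--     if target_bytes <= 0:
--         return ""
--     encoded = seed.encode("utf-8")
--     if len(encoded) >= target_bytes:
--         return encoded[:target_bytes].decode("utf-8", errors="ignore")
--
--     chunks = [seed]
--     total_bytes = len(encoded)
--     while total_bytes < target_bytes:
--         chunks.append(seed)
--         total_bytes += len(encoded)
--     return "\n".join(chunks).encode("utf-8")[:target_bytes].decode("utf-8", errors="ignore")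
-- ===== SOURCE B (Python) =====
-- def _repeat_to_size(seed: str, target_bytes: int) -> str:
--     if target_bytes <= 0:
--         return ""
--     encoded = seed.encode("utf-8")
--     if len(encoded) >= target_bytes:
--         return encoded[:target_bytes].decode("utf-8", errors="ignore")
--     n = -(-target_bytes // len(encoded))  # ceil(target_bytes / len(encoded))
--     return "\n".join([seed] * n).encode("utf-8")[:target_bytes].decode("utf-8", errors="ignore")
-- ===== Notes on version B (the rewrite author's own statement) =====
-- stated objective: simpler
-- what changed: replaced the while-loop that accumulates seed chunks until the byte total reaches the target with a closed-form ceiling-division chunk count and a single list replication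
import Mathlib
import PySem

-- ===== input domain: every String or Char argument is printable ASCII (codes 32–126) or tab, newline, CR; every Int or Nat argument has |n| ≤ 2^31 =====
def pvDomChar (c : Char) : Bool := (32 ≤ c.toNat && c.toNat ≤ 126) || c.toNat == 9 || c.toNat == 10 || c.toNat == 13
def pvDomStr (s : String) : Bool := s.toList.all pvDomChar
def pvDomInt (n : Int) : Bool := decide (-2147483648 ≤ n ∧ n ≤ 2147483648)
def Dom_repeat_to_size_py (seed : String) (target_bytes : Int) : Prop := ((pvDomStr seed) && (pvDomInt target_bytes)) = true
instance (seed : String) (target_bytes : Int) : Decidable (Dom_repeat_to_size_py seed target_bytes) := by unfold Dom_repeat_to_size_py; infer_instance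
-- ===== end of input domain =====

-- B replaces A's while-accumulation loop by a closed-form ceiling-division chunk count (objective: simpler).

-- ===== PORT A =====
-- On the admitted ASCII domain UTF-8 encoding is one byte per character, so
-- `encode("utf-8")`, `[:target_bytes]` and `decode("utf-8", errors="ignore")`
-- are ports as the char list, `List.take` and `String.ofList` (exact on that domain).
-- The while-loop carries fuel (target_bytes.toNat + 1 iterations always suffice,
-- since each iteration adds len(encoded) ≥ 1 to total when Pre_ holds).
def pvLoopA (seed : String) (target_bytes : Int) (chunks : List String) (total : Int) : Nat → List String
  | 0 => chunks
  | fuel + 1 =>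
    if total < target_bytes then
      pvLoopA seed target_bytes (chunks ++ [seed]) (total + (seed.toList.length : Int)) fuel
    else chunks

def repeat_to_size_py (seed : String) (target_bytes : Int) : String :=
  if target_bytes ≤ 0 then ""
  else if ((seed.toList.length : Int)) ≥ target_bytes then String.ofList (seed.toList.take target_bytes.toNat)
  else
    String.ofList ((String.intercalate "\n"
      (pvLoopA seed target_bytes [seed] ((seed.toList.length : Int)) (target_bytes.toNat + 1))).toList.take target_bytes.toNat)

-- ===== PORT B =====
def repeat_to_size_py_alt (seed : String) (target_bytes : Int) : String :=
  if target_bytes ≤ 0 then ""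
  else if ((seed.toList.length : Int)) ≥ target_bytes then String.ofList (seed.toList.take target_bytes.toNat)
  else
    String.ofList ((String.intercalate "\n"
      (List.replicate (-(PySem.Int.floordiv (-target_bytes) (seed.toList.length : Int))).toNat seed)).toList.take target_bytes.toNat)

-- ===== PRECONDITION & SPEC =====
-- Pre_ excludes only seed = "" with target_bytes > 0: there A's while-loop never
-- terminates (total_bytes stays 0), so A returns on no such input.
def Pre_repeat_to_size_py (seed : String) (target_bytes : Int) : Prop :=
  seed ≠ "" ∨ target_bytes ≤ 0
instance (seed : String) (target_bytes : Int) : Decidable (Pre_repeat_to_size_py seed target_bytes) := by unfold Pre_repeat_to_size_py; infer_instance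
def pvWitness_repeat_to_size_py : String × Int := ("ab", 5)

def Spec_repeat_to_size_py (seed : String) (target_bytes : Int) (out : String) : Prop := out = repeat_to_size_py_alt seed target_bytes
instance (seed : String) (target_bytes : Int) (out : String) : Decidable (Spec_repeat_to_size_py seed target_bytes out) := by unfold Spec_repeat_to_size_py; infer_instance

-- ===== CLAIM (what is proved, stated in full; the proofs are below) =====
def Claim_equal_repeat_to_size_py : Prop := ∀ (seed : String) (target_bytes : Int), Dom_repeat_to_size_py seed target_bytes → Pre_repeat_to_size_py seed target_bytes → Spec_repeat_to_size_py seed target_bytes (repeat_to_size_py seed target_bytes)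

-- ===== LEMMAS AND PROOFS =====

-- chunk count still to be appended when the running total is `total`
def pvCeilRem (target_bytes L total : Int) : Nat := ((target_bytes - total + L - 1) / L).toNat

lemma pvLoopA_eq (seed : String) (target_bytes : Int) (L : Int) (hL : L = (seed.toList.length : Int))
    (hpos : 0 < L) :
    ∀ (fuel : Nat) (total : Int) (chunks : List String), (target_bytes - total).toNat ≤ fuel →
      pvLoopA seed target_bytes chunks total fuel
        = chunks ++ List.replicate (pvCeilRem target_bytes L total) seed := by
  intro fuel
  induction fuel with
  | zero =>
    intro total chunks h
    have htt : target_bytes ≤ total := by omega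
    have h0 : pvCeilRem target_bytes L total = 0 := by
      unfold pvCeilRem
      have : (target_bytes - total + L - 1) / L < 1 := by
        rw [Int.ediv_lt_iff_lt_mul hpos]; omega
      omega
    simp [pvLoopA, h0]
  | succ fuel ih =>
    intro total chunks h
    unfold pvLoopA
    split_ifs with hlt
    · rw [show ((seed.toList.length : Int)) = L from hL.symm,
          ih (total + L) (chunks ++ [seed]) (by omega)]
      · have hstep : pvCeilRem target_bytes L total = pvCeilRem target_bytes L (total + L) + 1 := by
          unfold pvCeilRem
          have hnum : target_bytes - total + L - 1 = (target_bytes - (total + L) + L - 1) + 1 * L := by ring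
          rw [hnum, Int.add_mul_ediv_right _ _ (by omega : L ≠ 0)]
          have hnn : 0 ≤ (target_bytes - (total + L) + L - 1) / L := by
            apply Int.ediv_nonneg _ (by omega)
            omega
          omega
        rw [hstep, List.replicate_succ, List.append_assoc]
        simp
    · have htt : target_bytes ≤ total := by omega
      have h0 : pvCeilRem target_bytes L total = 0 := by
        unfold pvCeilRem
        have : (target_bytes - total + L - 1) / L < 1 := by
          rw [Int.ediv_lt_iff_lt_mul hpos]; omega
        omega
      simp [h0]

-- ===== VERDICT (by name: the statement is the Claim_ definition above) =====
theorem repeat_to_size_py_spec : Claim_equal_repeat_to_size_py := by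
  intro seed target_bytes _hDom hPre
  unfold Spec_repeat_to_size_py repeat_to_size_py repeat_to_size_py_alt
  split_ifs with h1 h2
  · rfl
  · rfl
  · -- loop branch: seed nonempty (else contradiction with h2 and ¬h1)
    set L : Int := (seed.toList.length : Int) with hLdef
    have hpos : 0 < L := by
      rcases hPre with hne | hle
      · have : seed.toList ≠ [] := by
          intro hnil
          exact hne (by simpa using congrArg String.ofList hnil)
        have : 0 < seed.toList.length := List.length_pos_iff.mpr this
        omega
      · omega
    rw [pvLoopA_eq seed target_bytes L hLdef hpos _ _ _ (by omega)]
    have hcount : (1 : Nat) + pvCeilRem target_bytes L L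
        = (-(PySem.Int.floordiv (-target_bytes) L)).toNat := by
      have hfd : PySem.Int.floordiv (-target_bytes) L = (-target_bytes).fdiv L := rfl
      rw [hfd, Int.fdiv_eq_ediv, if_pos (Or.inl (by omega : (0:Int) ≤ L)), sub_zero]
      unfold pvCeilRem
      -- let q, r be the euclidean quotient/remainder of -target_bytes by L
      have hq := Int.ediv_add_emod (-target_bytes) L
      have hr0 : 0 ≤ (-target_bytes) % L := Int.emod_nonneg _ (by omega)
      have hrL : (-target_bytes) % L < L := Int.emod_lt_of_pos _ hpos
      set q := (-target_bytes) / L with hqdef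
      set r := (-target_bytes) % L with hrdef
      -- target_bytes - L + L - 1 = target_bytes - 1 = (-q-1)*L + (L - r - 1)
      have hnum : target_bytes - L + L - 1 = (L - r - 1) + (-q - 1) * L := by
        have : target_bytes = -(L * q + r) := by omega
        rw [this]; ring
      have hdiv : (target_bytes - L + L - 1) / L = -q - 1 := by
        rw [hnum, Int.add_mul_ediv_right _ _ (by omega : L ≠ 0),
            Int.ediv_eq_zero_of_lt (by omega) (by omega)]
        ring
      rw [hdiv]
      -- q ≤ -1 because target_bytes > L ≥ 1 so -target_bytes < -L < 0
      have hq_neg : q ≤ -1 := by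
        have h2' : L < target_bytes := by omega
        have : L * q + r = -target_bytes := by omega
        nlinarith
      omega
    have hrepl : [seed] ++ List.replicate (pvCeilRem target_bytes L L) seed
        = List.replicate ((-(PySem.Int.floordiv (-target_bytes) L)).toNat) seed := by
      rw [← hcount, Nat.add_comm, List.replicate_succ]
      rfl
    rw [hrepl]
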